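-- pv_equiv track=rewrite | github.com/Est17256/Lab4PrediccionTexto | pre.py | calc_3gram
-- ===== SOURCE A (Python) =====
-- def calc_3gram(data):
--
--     n_gram = []
--
--     for tmp_data in data:
--         last = ""
--         p_last = ""
--         for wn in tmp_data.split():
--             if p_last == "":
--                 p_last = wn
--                 continue
--             elif last == "":
--                 last = p_last
--                 p_last = wn
--                 continue
--
--             n_gram.append((last, p_last, wn))
--             last = p_last
--             p_last = wn
--
--     return n_gram
-- ===== SOURCE B (Python) =====
-- def calc_3gram(data):
--     n_gram = []
--     for tmp_data in data:
--         words = tmp_data.split()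
--         n_gram.extend(zip(words, words[1:], words[2:]))
--     return n_gram
-- ===== Notes on version B (the rewrite author's own statement) =====
-- stated objective: simpler
-- what changed: Replaces the two-variable sliding-window state machine with continue-based warm-up by materializing the token list once and zipping it with its two shifted slices; no running state is maintained.
import Mathlib
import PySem

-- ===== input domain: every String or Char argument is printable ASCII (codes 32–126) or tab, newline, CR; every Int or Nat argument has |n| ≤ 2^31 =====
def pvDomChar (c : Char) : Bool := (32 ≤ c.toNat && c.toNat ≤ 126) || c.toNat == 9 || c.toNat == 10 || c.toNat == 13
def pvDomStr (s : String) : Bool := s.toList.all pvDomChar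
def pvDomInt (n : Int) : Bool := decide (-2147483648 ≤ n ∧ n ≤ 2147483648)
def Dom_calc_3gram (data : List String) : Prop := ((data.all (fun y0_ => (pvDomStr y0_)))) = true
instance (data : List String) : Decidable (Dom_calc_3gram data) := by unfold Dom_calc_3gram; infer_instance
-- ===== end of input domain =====

-- B replaces A's two-variable sliding-window state machine by zipping the token
-- list with its two shifted slices (simpler: no running state).

-- ===== PORT A =====
-- inner loop of A over the words of one string: state (last, p_last, n_gram)
def calc3gramInnerA : List String → String → String → List (String × String × String) →
    List (String × String × String)
  | [], _, _, acc => acc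
  | wn :: ws, last, p_last, acc =>
    if p_last = "" then calc3gramInnerA ws last wn acc
    else if last = "" then calc3gramInnerA ws p_last wn acc
    else calc3gramInnerA ws p_last wn (acc ++ [(last, p_last, wn)])

def calc_3gram (data : List String) : List (String × String × String) :=
  data.foldl (fun n_gram tmp_data =>
    calc3gramInnerA (PySem.Str.split₀ tmp_data) "" "" n_gram) []

-- ===== PORT B =====
def calc_3gram_alt (data : List String) : List (String × String × String) :=
  data.foldl (fun n_gram tmp_data =>
    let words := PySem.Str.split₀ tmp_data
    n_gram ++ words.zip ((PySem.List.slice words (some 1)).zip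
      (PySem.List.slice words (some 2)))) []

-- ===== PRECONDITION & SPEC =====
def Spec_calc_3gram (data : List String) (out : List (String × String × String)) : Prop := out = calc_3gram_alt data
instance (data : List String) (out : List (String × String × String)) : Decidable (Spec_calc_3gram data out) := by unfold Spec_calc_3gram; infer_instance

-- ===== CLAIM (what is proved, stated in full; the proofs are below) =====
def Claim_equal_calc_3gram : Prop := ∀ (data : List String), Dom_calc_3gram data → Spec_calc_3gram data (calc_3gram data)

-- ===== LEMMAS AND PROOFS =====

-- every token produced by Chars.split₀.go is nonempty (given the accumulator's are)
theorem split0_go_ne_nil (cs : List Char) : ∀ (cur : List Char) (acc : List (List Char)),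
    (∀ t ∈ acc, t ≠ []) → ∀ t ∈ PySem.Chars.split₀.go cs cur acc, t ≠ [] := by
  induction cs with
  | nil =>
    intro cur acc hacc t ht
    simp only [PySem.Chars.split₀.go] at ht
    split at ht
    · rw [List.mem_reverse] at ht
      exact hacc t ht
    · rw [List.mem_reverse] at ht
      rcases List.mem_cons.1 ht with h | h
      · subst h
        simp_all [List.isEmpty_iff]
      · exact hacc t h
  | cons c rest ih =>
    intro cur acc hacc t ht
    simp only [PySem.Chars.split₀.go] at ht
    split at ht
    · split at ht
      · exact ih [] acc hacc t ht
      · refine ih [] (cur.reverse :: acc) ?_ t ht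
        intro u hu
        rcases List.mem_cons.1 hu with h | h
        · subst h; simp_all [List.isEmpty_iff]
        · exact hacc u h
    · exact ih (c :: cur) acc hacc t ht

theorem split0_mem_ne_empty (s : String) : ∀ w ∈ PySem.Str.split₀ s, w ≠ "" := by
  intro w hw
  simp only [PySem.Str.split₀, List.mem_map] at hw
  obtain ⟨t, ht, rfl⟩ := hw
  have hne : t ≠ [] := split0_go_ne_nil s.toList [] [] (by simp) t ht
  intro hcontra
  have : (String.ofList t).toList = ("" : String).toList := by rw [hcontra]
  simp at this
  exact hne this

-- the steady state of A's inner loop: with both window slots filled it appends a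
-- trigram per word
theorem innerA_run (ws : List String) : ∀ (l p : String)
    (acc : List (String × String × String)), l ≠ "" → p ≠ "" → (∀ w ∈ ws, w ≠ "") →
    calc3gramInnerA ws l p acc = acc ++ (l :: p :: ws).zip ((p :: ws).zip ws) := by
  induction ws with
  | nil => intro l p acc _ _ _; simp [calc3gramInnerA]
  | cons w ws ih =>
    intro l p acc hl hp hws
    have hw : w ≠ "" := hws w (by simp)
    simp only [calc3gramInnerA, if_neg hp, if_neg hl]
    rw [ih p w (acc ++ [(l, p, w)]) hp hw (fun u hu => hws u (by simp [hu]))]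
    simp [List.zip]

-- A's inner loop starting empty builds exactly the zip of the word list with its
-- two shifts
theorem innerA_eq_zip (ws : List String) (acc : List (String × String × String))
    (hws : ∀ w ∈ ws, w ≠ "") :
    calc3gramInnerA ws "" "" acc = acc ++ ws.zip ((ws.drop 1).zip (ws.drop 2)) := by
  match ws with
  | [] => simp [calc3gramInnerA]
  | [a] => simp [calc3gramInnerA]
  | a :: b :: ws' =>
    have ha : a ≠ "" := hws a (by simp)
    have hb : b ≠ "" := hws b (by simp)
    rw [show calc3gramInnerA (a :: b :: ws') "" "" acc = calc3gramInnerA (b :: ws') "" a acc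
      from by simp [calc3gramInnerA]]
    rw [show calc3gramInnerA (b :: ws') "" a acc = calc3gramInnerA ws' a b acc
      from by simp [calc3gramInnerA, ha]]
    rw [innerA_run ws' a b acc ha hb (fun u hu => hws u (by simp [hu]))]
    simp [List.zip]

theorem calc3gram_fold_eq (data : List String) :
    ∀ acc, data.foldl (fun n_gram tmp_data =>
        calc3gramInnerA (PySem.Str.split₀ tmp_data) "" "" n_gram) acc
      = data.foldl (fun n_gram tmp_data =>
        let words := PySem.Str.split₀ tmp_data
        n_gram ++ words.zip ((PySem.List.slice words (some 1)).zip
          (PySem.List.slice words (some 2)))) acc := by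
  induction data with
  | nil => intro acc; rfl
  | cons s data ih =>
    intro acc
    simp only [List.foldl_cons]
    rw [innerA_eq_zip _ acc (split0_mem_ne_empty s),
      PySem.List.slice_from _ (by norm_num : (0:Int) ≤ 1),
      PySem.List.slice_from _ (by norm_num : (0:Int) ≤ 2)]
    exact ih _

-- ===== VERDICT (by name: the statement is the Claim_ definition above) =====
theorem calc_3gram_spec : Claim_equal_calc_3gram := by
  intro data _
  unfold Spec_calc_3gram calc_3gram calc_3gram_alt
  exact calc3gram_fold_eq data []
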